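-- pv_equiv track=rewrite | github.com/SunivAlgo/Algorithm | JeongHwi/스킬체크/Level2/1.py | solution
-- ===== SOURCE A (Python) =====
-- def convert_Melody(melody):
--     melody = melody.replace("C#","1")
--     melody = melody.replace("A#","2")
--     melody = melody.replace("D#","3")
--     melody = melody.replace("F#","4")
--     melody = melody.replace("G#","5")
--     return melody
--
-- def getTime(start,end):
--     start_hour,start_minute = map(int,start.split(":"))
--     end_hour,end_minute =  map(int,end.split(":"))
--     return (end_hour-start_hour)*60 + (end_minute-start_minute)
--
-- def solution(m,musicinfo):
--     m = convert_Melody(m)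
--     ans = []
--     for musics in musicinfo:
--         start,end,name,melody = musics.split(",")
--         time = getTime(start,end)
--         melody_conv = convert_Melody(melody)
--         mlen = len(melody_conv)
--         ans_melody = ""
--         if time == 0:
--             continue
--         for i in range(time):
--             ans_melody += melody_conv[i%mlen]
--
--         if m in ans_melody:
--             ans.append((name,time))
--     ans.sort(key=lambda x:-x[1])
--     if ans:
--         return ans[0][0]
--     else:
--         return "(None)"
-- ===== SOURCE B (Python) =====
-- def convert(melody):
--     for sharp, digit in (("C#", "1"), ("A#", "2"), ("D#", "3"), ("F#", "4"), ("G#", "5")):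
--         melody = melody.replace(sharp, digit)
--     return melody
--
-- def solution(m, musicinfo):
--     mc = convert(m)
--     best_name, best_time = None, None
--     for rec in musicinfo:
--         start, end, name, melody = rec.split(",")
--         sh, sm = map(int, start.split(":"))
--         eh, em = map(int, end.split(":"))
--         time = (eh - sh) * 60 + (em - sm)
--         if time == 0:
--             continue
--         mel = convert(melody)
--         played = (mel * (time // len(mel) + 1))[:time]
--         if mc in played and (best_time is None or time > best_time):
--             best_name, best_time = name, time
--     return best_name if best_name is not None else "(None)"
-- ===== Notes on version B (the rewrite author's own statement) =====
-- stated objective: alternative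
-- what changed: B replaces A's collect-all-matches list, final stable descending sort and head extraction by a single pass keeping a running (best_name, best_time) updated on strictly greater duration, and builds the played melody by string repetition and slicing ((mel*(time//len(mel)+1))[:time]) instead of A's per-character append loop.
-- outside the precondition, e.g. on solution('', ['10:00,09:00,X,']): A returns 'X', B raises ZeroDivisionError
import Mathlib
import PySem

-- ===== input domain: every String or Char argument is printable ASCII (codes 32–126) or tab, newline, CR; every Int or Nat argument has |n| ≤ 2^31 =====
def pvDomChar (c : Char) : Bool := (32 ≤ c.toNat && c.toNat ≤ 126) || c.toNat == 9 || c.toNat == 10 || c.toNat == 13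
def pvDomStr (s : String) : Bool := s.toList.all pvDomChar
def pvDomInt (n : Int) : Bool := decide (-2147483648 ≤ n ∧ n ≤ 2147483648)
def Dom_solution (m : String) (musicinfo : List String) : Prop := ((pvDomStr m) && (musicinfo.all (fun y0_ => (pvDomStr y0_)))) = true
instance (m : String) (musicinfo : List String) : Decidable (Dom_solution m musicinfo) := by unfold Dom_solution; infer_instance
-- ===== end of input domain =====

-- B replaces A's collect-then-stable-sort by a one-pass running best (update on strictly greater
-- duration) and builds the played melody by repeat-and-slice instead of a per-character loop.


-- ===== PORT A =====
def convertMelody (melody : String) : String :=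
  PySem.Str.replace (PySem.Str.replace (PySem.Str.replace (PySem.Str.replace
    (PySem.Str.replace melody "C#" "1") "A#" "2") "D#" "3") "F#" "4") "G#" "5"

-- the int() conversions and the arithmetic of getTime (none = ValueError of int())
def getTimeCore (sh sm eh em : String) : Option Int :=
  match PySem.Int.ofStr? sh, PySem.Int.ofStr? sm, PySem.Int.ofStr? eh, PySem.Int.ofStr? em with
  | some a, some b, some c, some d => some ((c - a) * 60 + (d - b))
  | _, _, _, _ => none

-- getTime(start, end); none exactly where Python raises (bad ":"-split unpack or int())
def getTime? (start : String) (end_ : String) : Option Int :=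
  match PySem.Str.split? start ":", PySem.Str.split? end_ ":" with
  | some [sh, sm], some [eh, em] => getTimeCore sh sm eh em
  | _, _ => none

-- body of A's for-loop after the record is unpacked and time computed; the mlen = 0 branch is
-- Python's ZeroDivisionError at melody_conv[i % mlen] (reached only when 0 < time)
def stepACore (mc : List Char) (ans : List (String × Int)) (name melody : String) (time : Int) :
    Option (List (String × Int)) :=
  if time = 0 then some ans
  else if 0 < time ∧ ((convertMelody melody).toList.length : Int) = 0 then none
  else if PySem.Chars.isIn mc
      ((PySem.List.pyRange 0 time 1).foldl
        (fun acc i => acc ++ [PySem.List.pyGetD (convertMelody melody).toList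
          (PySem.Int.mod i ((convertMelody melody).toList.length : Int)) ' ']) []) then
    some (ans ++ [(name, time)])
  else some ans

-- one iteration of A's for-loop; none exactly where Python raises
def stepA (mc : List Char) (ans : List (String × Int)) (musics : String) :
    Option (List (String × Int)) :=
  match PySem.Str.split? musics "," with
  | some [start, end_, name, melody] =>
    match getTime? start end_ with
    | some time => stepACore mc ans name melody time
    | none => none
  | _ => none

def solution (m : String) (musicinfo : List String) : String :=
  match musicinfo.foldl
      (fun acc musics => acc.bind (fun ans => stepA (convertMelody m).toList ans musics))
      (some []) with
  | some ans =>
    match PySem.List.sorted ans (fun x => -x.2) false with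
    | (name, _) :: _ => name
    | [] => "(None)"
  | none => ""   -- unreachable under Pre_solution (Python raises there)

-- ===== PORT B =====
def convertB (melody : String) : String :=
  [("C#", "1"), ("A#", "2"), ("D#", "3"), ("F#", "4"), ("G#", "5")].foldl
    (fun acc p => PySem.Str.replace acc p.1 p.2) melody

-- body of B's loop once the four ints are parsed; the empty-melody branch is Python's
-- ZeroDivisionError at time // len(mel) (a totality guard, same computation otherwise)
def stepBCore (mc : List Char) (best : Option (String × Int)) (name melody : String)
    (a b c d : Int) : Option (Option (String × Int)) :=
  if (c - a) * 60 + (d - b) = 0 then some best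
  else if ((convertB melody).toList.length : Int) = 0 then none
  else if PySem.Chars.isIn mc
        (PySem.List.slice
          (PySem.List.pyRepeat (convertB melody).toList
            (PySem.Int.floordiv ((c - a) * 60 + (d - b)) ((convertB melody).toList.length : Int) + 1))
          none (some ((c - a) * 60 + (d - b)))) &&
      (match best with | none => true | some (_, bt) => decide (bt < (c - a) * 60 + (d - b))) then
    some (some (name, (c - a) * 60 + (d - b)))
  else some best

-- one iteration of B's loop over the running (best_name, best_time); none exactly where Python raises
def stepB (mc : List Char) (best : Option (String × Int)) (rec : String) :
    Option (Option (String × Int)) :=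
  match PySem.Str.split? rec "," with
  | some [start, end_, name, melody] =>
    match PySem.Str.split? start ":", PySem.Str.split? end_ ":" with
    | some [sh, sm], some [eh, em] =>
      match PySem.Int.ofStr? sh, PySem.Int.ofStr? sm, PySem.Int.ofStr? eh, PySem.Int.ofStr? em with
      | some a, some b, some c, some d => stepBCore mc best name melody a b c d
      | _, _, _, _ => none
    | _, _ => none
  | _ => none

def solution_alt (m : String) (musicinfo : List String) : String :=
  match musicinfo.foldl
      (fun acc rec => acc.bind (fun best => stepB (convertB m).toList best rec))
      (some none) with
  | some (some (name, _)) => name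
  | some none => "(None)"
  | none => ""   -- unreachable under Pre_solution (Python raises there)

-- ===== PRECONDITION & SPEC =====
def timeOK (s : String) : Bool :=
  match PySem.Str.split? s ":" with
  | some [h, mi] => (PySem.Int.ofStr? h).isSome && (PySem.Int.ofStr? mi).isSome
  | _ => false

def recOK (rec : String) : Bool :=
  match PySem.Str.split? rec "," with
  | some [start, end_, _, melody] =>
      timeOK start && timeOK end_ && !(convertMelody melody).toList.isEmpty
  | _ => false

-- Pre_ admits records of the form "start,end,name,melody" with int-parsing H:M times and a
-- nonempty converted melody: on any other record A raises (ValueError on the unpack/int, or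
-- ZeroDivisionError for an empty melody with positive duration), except that an empty-melody
-- record with NEGATIVE duration is also excluded because B's repeat-and-slice itself raises
-- ZeroDivisionError where A happens to return (see cites).
def Pre_solution (m : String) (musicinfo : List String) : Prop :=
  ∀ rec ∈ musicinfo, recOK rec = true
instance (m : String) (musicinfo : List String) : Decidable (Pre_solution m musicinfo) := by
  unfold Pre_solution; infer_instance

def pvWitness_solution : String × List String :=
  ("ABC", ["12:00,12:14,HELLO,CDEFGAB", "13:00,13:05,WORLD,ABCDEF"])

def Spec_solution (m : String) (musicinfo : List String) (out : String) : Prop := out = solution_alt m musicinfo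
instance (m : String) (musicinfo : List String) (out : String) : Decidable (Spec_solution m musicinfo out) := by unfold Spec_solution; infer_instance

-- ===== CLAIM (what is proved, stated in full; the proofs are below) =====
def Claim_equal_solution : Prop := ∀ (m : String) (musicinfo : List String), Dom_solution m musicinfo → Pre_solution m musicinfo → Spec_solution m musicinfo (solution m musicinfo)

-- ===== LEMMAS AND PROOFS =====

-- the two melody converters agree (B's fold over the literal pair list unfolds to A's chain)
theorem convertB_eq (s : String) : convertB s = convertMelody s := rfl

-- B's running-best step as a function of the list A accumulates
def bestOf (ans : List (String × Int)) : Option (String × Int) :=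
  ans.foldl (fun b x => match b with
    | none => some x
    | some p => if p.2 < x.2 then some x else some p) none

theorem bestOf_append (ans : List (String × Int)) (x : String × Int) :
    bestOf (ans ++ [x]) = match bestOf ans with
      | none => some x
      | some p => if p.2 < x.2 then some x else some p := by
  simp [bestOf, List.foldl_append]

theorem head?_insertBy (bef : (String × Int) → (String × Int) → Bool) (x : String × Int)
    (l : List (String × Int)) :
    (PySem.List.insertBy bef x l).head? =
      some (match l.head? with | none => x | some y => if bef x y then x else y) := by
  cases l with
  | nil => simp [PySem.List.insertBy]
  | cons y ys => by_cases h : bef x y = true <;> simp [PySem.List.insertBy, h]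

theorem head?_sorted_eq_bestOf (ans : List (String × Int)) :
    (PySem.List.sorted ans (fun x => -x.2) false).head? = bestOf ans := by
  rw [PySem.List.sorted_eq_foldl_insertBy]
  unfold bestOf
  induction ans using List.reverseRecOn with
  | nil => simp
  | append_singleton ans x ih =>
    rw [List.foldl_append, List.foldl_append]
    simp only [List.foldl_cons, List.foldl_nil]
    rw [head?_insertBy]
    cases h : (ans.foldl (fun acc x =>
        PySem.List.insertBy (fun a b => decide ((fun x => -x.2) a < (fun x => -x.2) b)) x acc)
        []).head? with
    | none => rw [h] at ih; simp [← ih]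
    | some y =>
      rw [h] at ih
      simp only [← ih]
      by_cases hy : y.2 < x.2 <;> simp [hy]

theorem pyRange_nonpos (t : Int) (h : t ≤ 0) : PySem.List.pyRange 0 t 1 = [] := by
  simp [PySem.List.pyRange]; omega

theorem slice_nil (t : Int) : PySem.List.slice ([] : List Char) none (some t) = [] := by
  simp [PySem.List.slice]

theorem mapRange_prefix (mel : List Char) (t : Nat) (ht : t ≤ mel.length) :
    (List.range t).map (fun k => mel.getD (k % mel.length) ' ') = mel.take t := by
  apply List.ext_getElem
  · simp; omega
  · intro i h1 h2
    simp only [List.getElem_map, List.getElem_range, List.getElem_take]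
    have hi : i < mel.length := lt_of_lt_of_le (by simpa using h1) ht
    rw [Nat.mod_eq_of_lt hi]
    exact List.getD_eq_getElem mel ' ' hi

theorem rangeMap_take (mel : List Char) :
    ∀ (n t : Nat), t ≤ n * mel.length →
      (List.range t).map (fun k => mel.getD (k % mel.length) ' ')
        = ((List.replicate n mel).flatten).take t := by
  intro n
  induction n with
  | zero =>
    intro t h
    have : t = 0 := by omega
    subst this; simp
  | succ n ih =>
    intro t h
    rw [List.replicate_succ, List.flatten_cons]
    by_cases hts : t ≤ mel.length
    · rw [List.take_append_of_le_length hts, mapRange_prefix mel t hts]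
    · have hsplit : t = mel.length + (t - mel.length) := by omega
      rw [hsplit, List.range_add, List.map_append, List.take_append,
        List.take_of_length_le (by omega), Nat.add_sub_cancel_left]
      congr 1
      · have hpre := mapRange_prefix mel mel.length le_rfl
        simpa using hpre
      · rw [List.map_map]
        have hfe : ((fun k => mel.getD (k % mel.length) ' ') ∘ (fun x => mel.length + x))
            = fun k => mel.getD (k % mel.length) ' ' := by
          funext x; simp [Nat.add_mod_left]
        rw [hfe]
        apply ih
        have hmul : (n + 1) * mel.length = n * mel.length + mel.length := by ring
        omega

-- A's per-character loop equals B's repeat-and-slice played melody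
theorem played_eq (mel : List Char) (hm : mel ≠ []) (time : Int) :
    (PySem.List.pyRange 0 time 1).foldl
        (fun acc i => acc ++ [PySem.List.pyGetD mel (PySem.Int.mod i (mel.length : Int)) ' ']) []
      = PySem.List.slice
          (PySem.List.pyRepeat mel (PySem.Int.floordiv time (mel.length : Int) + 1))
          none (some time) := by
  have hL : 0 < mel.length := List.length_pos_iff.mpr hm
  rw [PySem.List.foldl_append_singleton_eq_map, List.nil_append]
  rcases lt_trichotomy time 0 with hneg | rfl | hpos
  · rw [pyRange_nonpos time hneg.le, List.map_nil]
    have hq : PySem.Int.floordiv time (mel.length : Int) + 1 ≤ 0 := by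
      have h2 : ¬ ((0:Int) ≤ PySem.Int.floordiv time (mel.length : Int)) := by
        rw [PySem.Int.le_floordiv_iff_mul_le (by exact_mod_cast hL)]
        omega
      omega
    have hrep : PySem.List.pyRepeat mel (PySem.Int.floordiv time (mel.length : Int) + 1) = [] := by
      simp [PySem.List.pyRepeat, Int.toNat_of_nonpos hq]
    rw [hrep, slice_nil]
  · rw [pyRange_nonpos 0 le_rfl, List.map_nil, PySem.List.slice_to _ (le_refl (0:Int))]
    simp
  · obtain ⟨t, rfl⟩ : ∃ t : Nat, time = (t : Int) :=
      ⟨time.toNat, (Int.toNat_of_nonneg hpos.le).symm⟩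
    rw [PySem.List.pyRange_zero_natCast, List.map_map]
    have hfun : ((fun i => PySem.List.pyGetD mel (PySem.Int.mod i (mel.length : Int)) ' ')
          ∘ (fun k : Nat => (k : Int)))
        = fun k : Nat => mel.getD (k % mel.length) ' ' := by
      funext k
      simp only [Function.comp_apply]
      rw [PySem.Int.mod_natCast, PySem.List.pyGetD_natCast]
    rw [hfun]
    rw [PySem.Int.floordiv_natCast t mel.length]
    rw [show ((t / mel.length : Nat) : Int) + 1 = ((t / mel.length + 1 : Nat) : Int) by push_cast; ring]
    rw [PySem.List.slice_to_natCast]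
    have hrep : PySem.List.pyRepeat mel ((t / mel.length + 1 : Nat) : Int)
        = (List.replicate (t / mel.length + 1) mel).flatten := by
      have htn : ((t / mel.length + 1 : Nat) : Int).toNat = t / mel.length + 1 := Int.toNat_natCast _
      simp only [PySem.List.pyRepeat, htn]
    rw [hrep]
    apply rangeMap_take mel
    have h1 := Nat.div_add_mod t mel.length
    have h2 := Nat.mod_lt t hL
    have h3 : (t / mel.length + 1) * mel.length = mel.length * (t / mel.length) + mel.length := by
      ring
    omega

-- the two loop bodies agree once the record is unpacked: A appends iff B updates its best
theorem core_eq (mc : List Char) (name : String) (mel : List Char) (hmel : mel ≠ [])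
    (T : Int) (ans : List (String × Int)) :
    ∃ ans',
      (if T = 0 then some ans
       else if 0 < T ∧ ((mel.length : Nat) : Int) = 0 then none
       else if PySem.Chars.isIn mc
           ((PySem.List.pyRange 0 T 1).foldl
             (fun acc i => acc ++ [PySem.List.pyGetD mel (PySem.Int.mod i (mel.length : Int)) ' '])
             []) then some (ans ++ [(name, T)])
       else some ans) = some ans' ∧
      (if T = 0 then some (bestOf ans)
       else if ((mel.length : Nat) : Int) = 0 then none
       else if PySem.Chars.isIn mc
             (PySem.List.slice
               (PySem.List.pyRepeat mel (PySem.Int.floordiv T (mel.length : Int) + 1))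
               none (some T)) &&
           (match bestOf ans with | none => true | some (_, bt) => decide (bt < T)) then
         some (some (name, T))
       else some (bestOf ans)) = some (bestOf ans') := by
  have hlen : ((mel.length : Nat) : Int) ≠ 0 := by
    have hn : mel.length ≠ 0 := fun h0 => hmel (List.eq_nil_of_length_eq_zero h0)
    exact_mod_cast hn
  by_cases ht : T = 0
  · rw [if_pos ht, if_pos ht]
    exact ⟨ans, rfl, rfl⟩
  · rw [if_neg ht, if_neg ht, if_neg (fun hx => hlen hx.2), if_neg hlen,
      played_eq mel hmel T]
    cases hin : PySem.Chars.isIn mc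
        (PySem.List.slice
          (PySem.List.pyRepeat mel (PySem.Int.floordiv T (mel.length : Int) + 1))
          none (some T)) with
    | false =>
      refine ⟨ans, by simp, by simp⟩
    | true =>
      refine ⟨ans ++ [(name, T)], by simp, ?_⟩
      rw [bestOf_append]
      cases hbo : bestOf ans with
      | none => simp
      | some p =>
        by_cases hlt : p.2 < T
        · simp [hlt]
        · simp [hlt]

-- per-record: A's step succeeds and B's step tracks bestOf of A's list
theorem step_eq (mc : List Char) (rec : String) (h : recOK rec = true)
    (ans : List (String × Int)) :
    ∃ ans', stepA mc ans rec = some ans' ∧ stepB mc (bestOf ans) rec = some (bestOf ans') := by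
  unfold recOK at h
  cases hs : PySem.Str.split? rec "," with
  | none => rw [hs] at h; simp at h
  | some parts =>
    rw [hs] at h
    rcases parts with _ | ⟨start, parts⟩; · simp at h
    rcases parts with _ | ⟨end_, parts⟩; · simp at h
    rcases parts with _ | ⟨name, parts⟩; · simp at h
    rcases parts with _ | ⟨melody, parts⟩; · simp at h
    rcases parts with _ | ⟨x, parts⟩; swap; · simp at h
    rw [Bool.and_eq_true, Bool.and_eq_true] at h
    obtain ⟨⟨h1, h2⟩, h3⟩ := h
    unfold timeOK at h1 h2
    cases hss : PySem.Str.split? start ":" with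
    | none => rw [hss] at h1; simp at h1
    | some ps =>
      rw [hss] at h1
      rcases ps with _ | ⟨sh, ps⟩; · simp at h1
      rcases ps with _ | ⟨sm, ps⟩; · simp at h1
      rcases ps with _ | ⟨y1, ps⟩; swap; · simp at h1
      cases hse : PySem.Str.split? end_ ":" with
      | none => rw [hse] at h2; simp at h2
      | some pe =>
        rw [hse] at h2
        rcases pe with _ | ⟨eh, pe⟩; · simp at h2
        rcases pe with _ | ⟨em, pe⟩; · simp at h2
        rcases pe with _ | ⟨y2, pe⟩; swap; · simp at h2
        simp only [Bool.and_eq_true, Option.isSome_iff_exists] at h1 h2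
        obtain ⟨⟨a, ha⟩, ⟨b, hb⟩⟩ := h1
        obtain ⟨⟨c, hc⟩, ⟨d, hd⟩⟩ := h2
        have hmel : (convertMelody melody).toList ≠ [] := by
          intro hnil; rw [hnil] at h3; exact absurd h3 (by decide)
        have hgt : getTime? start end_ = some ((c - a) * 60 + (d - b)) := by
          have e1 : getTime? start end_ = getTimeCore sh sm eh em := by
            unfold getTime?; rw [hss, hse]
          have e2 : getTimeCore sh sm eh em = some ((c - a) * 60 + (d - b)) := by
            unfold getTimeCore; rw [ha, hb, hc, hd]
          rw [e1, e2]
        have eA : stepA mc ans rec = stepACore mc ans name melody ((c - a) * 60 + (d - b)) := by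
          have e1 : stepA mc ans rec =
              (match getTime? start end_ with
               | some time => stepACore mc ans name melody time
               | none => none) := by
            unfold stepA; rw [hs]
          rw [e1, hgt]
        have eB : stepB mc (bestOf ans) rec = stepBCore mc (bestOf ans) name melody a b c d := by
          have e1 : stepB mc (bestOf ans) rec =
              (match PySem.Str.split? start ":", PySem.Str.split? end_ ":" with
               | some [sh, sm], some [eh, em] =>
                 match PySem.Int.ofStr? sh, PySem.Int.ofStr? sm,
                     PySem.Int.ofStr? eh, PySem.Int.ofStr? em with
                 | some a, some b, some c, some d => stepBCore mc (bestOf ans) name melody a b c d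
                 | _, _, _, _ => none
               | _, _ => none) := by
            unfold stepB; rw [hs]
          have e2 : (match PySem.Int.ofStr? sh, PySem.Int.ofStr? sm,
                  PySem.Int.ofStr? eh, PySem.Int.ofStr? em with
                | some a, some b, some c, some d => stepBCore mc (bestOf ans) name melody a b c d
                | _, _, _, _ => none) = stepBCore mc (bestOf ans) name melody a b c d := by
            rw [ha, hb, hc, hd]
          rw [e1, hss, hse]
          exact e2
        rw [eA, eB]
        unfold stepACore stepBCore
        rw [convertB_eq]
        exact core_eq mc name ((convertMelody melody).toList) hmel ((c - a) * 60 + (d - b)) ans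

theorem fold_eq (mc : List Char) (musicinfo : List String)
    (h : ∀ rec ∈ musicinfo, recOK rec = true) (ans : List (String × Int)) :
    ∃ ans',
      musicinfo.foldl (fun acc musics => acc.bind (fun a => stepA mc a musics)) (some ans)
        = some ans' ∧
      musicinfo.foldl (fun acc r => acc.bind (fun b => stepB mc b r)) (some (bestOf ans))
        = some (bestOf ans') := by
  induction musicinfo generalizing ans with
  | nil => exact ⟨ans, rfl, rfl⟩
  | cons rec rest ih =>
    obtain ⟨ans1, hA, hB⟩ := step_eq mc rec (h rec (by simp)) ans
    obtain ⟨ans', hA', hB'⟩ := ih (fun r hr => h r (by simp [hr])) ans1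
    exact ⟨ans', by simpa [hA] using hA', by simpa [hB] using hB'⟩

-- ===== VERDICT (by name: the statement is the Claim_ definition above) =====
theorem solution_spec : Claim_equal_solution := by
  intro m musicinfo _ hpre
  unfold Spec_solution solution solution_alt
  rw [convertB_eq]
  obtain ⟨ans', hA, hB⟩ := fold_eq ((convertMelody m).toList) musicinfo hpre []
  rw [show bestOf [] = none from rfl] at hB
  rw [hA, hB]
  have hh := head?_sorted_eq_bestOf ans'
  cases hs : PySem.List.sorted ans' (fun x => -x.2) false with
  | nil => rw [hs] at hh; cases hb : bestOf ans' <;> rw [hb] at hh <;> simp_all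
  | cons p t =>
    rw [hs] at hh
    cases hb : bestOf ans' with
    | none => rw [hb] at hh; simp_all
    | some q =>
      rw [hb] at hh
      simp only [List.head?_cons, Option.some.injEq] at hh
      subst hh; simp [hs]
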